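-- pv_equiv track=rewrite | github.com/PixelCode01/syllabo | src/optimal_learning_engine.py | _prioritize_advanced_content
-- ===== SOURCE A (Python) =====
-- from typing import List, Dict, Optional, Tuple
--
-- def _prioritize_advanced_content(learning_path: Dict) -> Dict:
--     """Prioritize advanced content in the learning path"""
--     supplementary_videos = learning_path.get('supplementary_videos', [])
--     advanced_content = []
--     other_content = []
--
--     for video in supplementary_videos:
--         if video.get('coverage_type') in ['deep_dive', 'comprehensive_alternative']:
--             advanced_content.append(video)
--         else:
--             other_content.append(video)
--
--     reordered = advanced_content + other_content
--     learning_path['supplementary_videos'] = reordered[:3]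
--     return learning_path
-- ===== SOURCE B (Python) =====
-- def _prioritize_advanced_content(learning_path):
--     """Prioritize advanced content in the learning path"""
--     videos = learning_path.get('supplementary_videos', [])
--     reordered = sorted(videos, key=lambda v: 0 if v.get('coverage_type') in ['deep_dive', 'comprehensive_alternative'] else 1)
--     learning_path['supplementary_videos'] = reordered[:3]
--     return learning_path
-- ===== Notes on version B (the rewrite author's own statement) =====
-- stated objective: idiomatic
-- what changed: Replaces the two-accumulator partition loop with a single stable sort by a binary key (0 for advanced coverage types, 1 otherwise), whose stability reproduces A's ordering exactly.
import Mathlib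
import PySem

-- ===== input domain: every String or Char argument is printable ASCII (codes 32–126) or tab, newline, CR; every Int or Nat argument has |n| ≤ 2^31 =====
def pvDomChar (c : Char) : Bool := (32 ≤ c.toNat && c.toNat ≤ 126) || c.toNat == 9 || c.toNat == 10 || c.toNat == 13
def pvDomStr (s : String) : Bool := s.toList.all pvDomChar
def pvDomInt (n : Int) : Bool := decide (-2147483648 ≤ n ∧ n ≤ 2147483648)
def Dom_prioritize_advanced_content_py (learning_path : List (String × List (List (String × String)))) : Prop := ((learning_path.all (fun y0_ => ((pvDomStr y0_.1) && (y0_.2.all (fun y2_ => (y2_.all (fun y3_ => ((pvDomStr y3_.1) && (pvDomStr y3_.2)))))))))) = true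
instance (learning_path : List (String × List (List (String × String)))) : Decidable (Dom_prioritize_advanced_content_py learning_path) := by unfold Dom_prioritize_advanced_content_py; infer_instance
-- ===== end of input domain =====

-- B replaces A's two-accumulator partition loop by one stable sort with a binary key (idiomatic);
-- both mutate the input dict the same way in Python, the theorem is about the returned value.

-- shared dict primitives (d.get(k) / d[k] = v on an association list, first-match / overwrite-in-place-or-append)
def pvAssocGet? {ν : Type} (d : List (String × ν)) (k : String) : Option ν :=
  match d with
  | [] => none
  | (k', v) :: t => if k' == k then some v else pvAssocGet? t k

def pvAssocSet {ν : Type} (d : List (String × ν)) (k : String) (v : ν) : List (String × ν) :=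
  match d with
  | [] => [(k, v)]
  | (k', v') :: t => if k' == k then (k, v) :: t else (k', v') :: pvAssocSet t k v

-- video.get('coverage_type') in ['deep_dive', 'comprehensive_alternative']  (None when the key is absent, never in the list)
def pvIsAdvanced (video : List (String × String)) : Bool :=
  match pvAssocGet? video "coverage_type" with
  | some s => s == "deep_dive" || s == "comprehensive_alternative"
  | none => false

-- ===== PORT A =====
def prioritize_advanced_content_py (learning_path : List (String × List (List (String × String)))) : List (String × List (List (String × String))) :=
  let supplementary_videos := (pvAssocGet? learning_path "supplementary_videos").getD []
  let st := supplementary_videos.foldl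
    (fun (st : List (List (String × String)) × List (List (String × String))) video =>
      if pvIsAdvanced video then (st.1 ++ [video], st.2) else (st.1, st.2 ++ [video]))
    ([], [])
  let reordered := st.1 ++ st.2
  pvAssocSet learning_path "supplementary_videos" (PySem.List.slice reordered none (some 3))

-- ===== PORT B =====
def prioritize_advanced_content_py_alt (learning_path : List (String × List (List (String × String)))) : List (String × List (List (String × String))) :=
  let videos := (pvAssocGet? learning_path "supplementary_videos").getD []
  let reordered := PySem.List.sorted videos (fun v => if pvIsAdvanced v then (0 : Int) else 1) false
  pvAssocSet learning_path "supplementary_videos" (PySem.List.slice reordered none (some 3))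

-- ===== PRECONDITION & SPEC =====
def Spec_prioritize_advanced_content_py (learning_path : List (String × List (List (String × String)))) (out : List (String × List (List (String × String)))) : Prop := out = prioritize_advanced_content_py_alt learning_path
instance (learning_path : List (String × List (List (String × String)))) (out : List (String × List (List (String × String)))) : Decidable (Spec_prioritize_advanced_content_py learning_path out) := by unfold Spec_prioritize_advanced_content_py; infer_instance

-- ===== CLAIM (what is proved, stated in full; the proofs are below) =====
def Claim_equal_prioritize_advanced_content_py : Prop := ∀ (learning_path : List (String × List (List (String × String)))), Dom_prioritize_advanced_content_py learning_path → Spec_prioritize_advanced_content_py learning_path (prioritize_advanced_content_py learning_path)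

-- ===== LEMMAS AND PROOFS =====

-- the comparison insertion-sort uses for B's binary key
def pvB (a b : List (String × String)) : Bool :=
  decide ((if pvIsAdvanced a then (0 : Int) else 1) < (if pvIsAdvanced b then (0 : Int) else 1))

theorem pvB_false_left {x y : List (String × String)} (hx : pvIsAdvanced x = false) :
    pvB x y = false := by
  simp [pvB, hx]; split <;> omega

theorem pv_ins_oth (x : List (String × String)) (l : List (List (String × String)))
    (hx : pvIsAdvanced x = false) :
    PySem.List.insertBy pvB x l = l ++ [x] := by
  induction l with
  | nil => rfl
  | cons y ys ih => simp [PySem.List.insertBy, pvB_false_left hx, ih]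

theorem pv_ins_adv (x : List (String × String)) (adv oth : List (List (String × String)))
    (hx : pvIsAdvanced x = true)
    (hadv : ∀ a ∈ adv, pvIsAdvanced a = true)
    (hoth : ∀ b ∈ oth, pvIsAdvanced b = false) :
    PySem.List.insertBy pvB x (adv ++ oth) = adv ++ x :: oth := by
  induction adv with
  | nil =>
    cases oth with
    | nil => rfl
    | cons y ys =>
      have hy := hoth y (by simp)
      simp [PySem.List.insertBy, pvB, hx, hy]
  | cons a as ih =>
    have ha := hadv a (by simp)
    have : pvB x a = false := by simp [pvB, hx, ha]
    simp [PySem.List.insertBy, this]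
    exact ih (fun a h => hadv a (by simp [h]))

theorem pv_foldl_ins (xs : List (List (String × String))) :
    ∀ (adv oth : List (List (String × String))),
    (∀ a ∈ adv, pvIsAdvanced a = true) → (∀ b ∈ oth, pvIsAdvanced b = false) →
    xs.foldl (fun acc x => PySem.List.insertBy pvB x acc) (adv ++ oth)
      = (adv ++ xs.filter pvIsAdvanced) ++ (oth ++ xs.filter (fun v => !pvIsAdvanced v)) := by
  induction xs with
  | nil => intro adv oth _ _; simp
  | cons x xs ih =>
    intro adv oth hadv hoth
    by_cases hx : pvIsAdvanced x = true
    · have h1 : PySem.List.insertBy pvB x (adv ++ oth) = (adv ++ [x]) ++ oth := by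
        rw [pv_ins_adv x adv oth hx hadv hoth]; simp
      simp only [List.foldl_cons, h1]
      rw [ih (adv ++ [x]) oth
        (by intro a h; rcases List.mem_append.1 h with h | h
            · exact hadv a h
            · simp at h; simpa [h] using hx)
        hoth]
      simp [hx]
    · have hx' : pvIsAdvanced x = false := by simpa using hx
      have h1 : PySem.List.insertBy pvB x (adv ++ oth) = adv ++ (oth ++ [x]) := by
        rw [pv_ins_oth x (adv ++ oth) hx']; simp
      simp only [List.foldl_cons, h1]
      rw [ih adv (oth ++ [x]) hadv
        (by intro b h; rcases List.mem_append.1 h with h | h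
            · exact hoth b h
            · simp at h; simpa [h] using hx')]
      simp [hx']

theorem pv_sorted_eq (xs : List (List (String × String))) :
    PySem.List.sorted xs (fun v => if pvIsAdvanced v then (0 : Int) else 1) false
      = xs.filter pvIsAdvanced ++ xs.filter (fun v => !pvIsAdvanced v) := by
  have h := pv_foldl_ins xs [] [] (by simp) (by simp)
  simpa [PySem.List.sorted, pvB] using h

theorem pv_foldl_part (xs : List (List (String × String))) :
    ∀ (adv oth : List (List (String × String))),
    xs.foldl (fun (st : List (List (String × String)) × List (List (String × String))) v =>
        if pvIsAdvanced v then (st.1 ++ [v], st.2) else (st.1, st.2 ++ [v])) (adv, oth)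
      = (adv ++ xs.filter pvIsAdvanced, oth ++ xs.filter (fun v => !pvIsAdvanced v)) := by
  induction xs with
  | nil => intro adv oth; simp
  | cons x xs ih =>
    intro adv oth
    by_cases hx : pvIsAdvanced x = true
    · simp only [List.foldl_cons, hx, if_true, ih, List.filter_cons]
      simp
    · have hx' : pvIsAdvanced x = false := by simpa using hx
      simp only [List.foldl_cons, hx', if_false, Bool.false_eq_true, ih, List.filter_cons]
      simp

-- ===== VERDICT (by name: the statement is the Claim_ definition above) =====
theorem prioritize_advanced_content_py_spec : Claim_equal_prioritize_advanced_content_py := by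
  intro lp _
  unfold Spec_prioritize_advanced_content_py
  simp only [prioritize_advanced_content_py, prioritize_advanced_content_py_alt]
  rw [pv_foldl_part, pv_sorted_eq]
  simp
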